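-- pv_equiv track=rewrite | github.com/nadounegi/- | 11月24日/Class08_ouyou02.py | count_method
-- ===== SOURCE A (Python) =====
-- def count_method(gono:list,c:int):
--         c1 = 0
--         c2 = 0
--         c3 = 0
--
--         for i in range(c):
--             if gono[i] == 1:
--                 c1 += 1
--             elif gono[i] == 2:
--                 c2 += 1
--             else:
--                 c3 += 1
--         return c1,c2,c3
-- ===== SOURCE B (Python) =====
-- def count_method(gono: list, c: int):
--     prefix = gono[:c] if c >= 0 else []
--     c1 = prefix.count(1)
--     c2 = prefix.count(2)
--     return c1, c2, len(prefix) - c1 - c2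
-- ===== Notes on version B (the rewrite author's own statement) =====
-- stated objective: simpler
-- what changed: B replaces the per-element three-way branch loop with a slice plus two list.count passes, deriving the third count by subtraction.
import Mathlib
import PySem

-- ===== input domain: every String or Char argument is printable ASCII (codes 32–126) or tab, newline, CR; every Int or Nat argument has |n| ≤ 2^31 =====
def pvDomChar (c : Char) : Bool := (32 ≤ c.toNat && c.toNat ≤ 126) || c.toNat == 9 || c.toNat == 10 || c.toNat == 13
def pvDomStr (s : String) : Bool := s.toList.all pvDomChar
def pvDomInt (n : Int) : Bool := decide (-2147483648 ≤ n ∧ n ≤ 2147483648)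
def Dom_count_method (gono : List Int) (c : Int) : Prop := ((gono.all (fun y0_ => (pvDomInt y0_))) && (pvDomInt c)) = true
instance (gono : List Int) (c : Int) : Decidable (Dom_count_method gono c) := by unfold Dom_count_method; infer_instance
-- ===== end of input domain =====

-- B counts the prefix with two list.count passes and derives the third count by subtraction,
-- instead of A's per-element three-way branch loop; equal on Pre_ (c ≤ len(gono), where A does not raise).

-- ===== PORT A =====
-- for i in range(c): branch on gono[i]; the getD default 0 is only reachable outside Pre_ (where Python raises IndexError)
def count_method (gono : List Int) (c : Int) : Int × Int × Int :=
  (PySem.List.pyRange 0 c 1).foldl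
    (fun (s : Int × Int × Int) i =>
      if PySem.List.pyGetD gono i 0 = 1 then (s.1 + 1, s.2.1, s.2.2)
      else if PySem.List.pyGetD gono i 0 = 2 then (s.1, s.2.1 + 1, s.2.2)
      else (s.1, s.2.1, s.2.2 + 1))
    (0, 0, 0)

-- ===== PORT B =====
def count_method_alt (gono : List Int) (c : Int) : Int × Int × Int :=
  let pre := if 0 ≤ c then PySem.List.slice gono none (some c) else []
  let c1 : Int := PySem.List.count pre 1
  let c2 : Int := PySem.List.count pre 2
  (c1, c2, (pre.length : Int) - c1 - c2)

-- ===== PRECONDITION & SPEC =====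
-- A raises IndexError exactly when c > len(gono); those inputs are excluded.
def Pre_count_method (gono : List Int) (c : Int) : Prop := c ≤ (gono.length : Int)
instance (gono : List Int) (c : Int) : Decidable (Pre_count_method gono c) := by unfold Pre_count_method; infer_instance
def pvWitness_count_method : List Int × Int := ([1, 2, 3, 1], 3)

def Spec_count_method (gono : List Int) (c : Int) (out : Int × Int × Int) : Prop := out = count_method_alt gono c
instance (gono : List Int) (c : Int) (out : Int × Int × Int) : Decidable (Spec_count_method gono c out) := by unfold Spec_count_method; infer_instance

-- ===== CLAIM (what is proved, stated in full; the proofs are below) =====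
def Claim_equal_count_method : Prop := ∀ (gono : List Int) (c : Int), Dom_count_method gono c → Pre_count_method gono c → Spec_count_method gono c (count_method gono c)

-- ===== LEMMAS AND PROOFS =====

-- A's loop over a list equals B's count-based triple (accumulator generalized).
theorem foldl_count_triple (t : List Int) (a b d : Int) :
    t.foldl
      (fun (s : Int × Int × Int) (x : Int) =>
        if x = 1 then (s.1 + 1, s.2.1, s.2.2)
        else if x = 2 then (s.1, s.2.1 + 1, s.2.2)
        else (s.1, s.2.1, s.2.2 + 1)) (a, b, d)
      = (a + PySem.List.count t 1, b + PySem.List.count t 2,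
         d + (t.length : Int) - PySem.List.count t 1 - PySem.List.count t 2) := by
  induction t generalizing a b d with
  | nil => simp [PySem.List.count]
  | cons x xs ih =>
    by_cases h1 : x = 1
    · simp [h1, List.foldl_cons, ih, PySem.List.count]
      omega
    · by_cases h2 : x = 2
      · simp [h2, List.foldl_cons, ih, PySem.List.count]
        omega
      · simp [h1, h2, List.foldl_cons, ih, PySem.List.count]
        omega

-- ===== VERDICT (by name: the statement is the Claim_ definition above) =====
theorem count_method_spec : Claim_equal_count_method := by
  intro gono c _ hpre
  unfold Spec_count_method count_method count_method_alt
  by_cases hc : 0 ≤ c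
  · have hcle : c.toNat ≤ gono.length := by
      unfold Pre_count_method at hpre; omega
    simp only [if_pos hc, PySem.List.slice_to gono hc]
    set t := gono.take c.toNat with ht
    have hlen : (t.length : Int) = c := by
      simp [ht, List.length_take, Nat.min_eq_left hcle]; omega
    have hcongr : (PySem.List.pyRange 0 c 1).foldl
        (fun (s : Int × Int × Int) i =>
          if PySem.List.pyGetD gono i 0 = 1 then (s.1 + 1, s.2.1, s.2.2)
          else if PySem.List.pyGetD gono i 0 = 2 then (s.1, s.2.1 + 1, s.2.2)
          else (s.1, s.2.1, s.2.2 + 1)) (0, 0, 0)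
        = (PySem.List.pyRange 0 c 1).foldl
        (fun (s : Int × Int × Int) i =>
          if PySem.List.pyGetD t i 0 = 1 then (s.1 + 1, s.2.1, s.2.2)
          else if PySem.List.pyGetD t i 0 = 2 then (s.1, s.2.1 + 1, s.2.2)
          else (s.1, s.2.1, s.2.2 + 1)) (0, 0, 0) := by
      apply PySem.List.foldl_congr_mem
      intro acc i hi
      have hmem := (PySem.List.mem_pyRange_one).mp hi
      have hget : PySem.List.pyGetD gono i 0 = PySem.List.pyGetD t i 0 := by
        have h0 : 0 ≤ i := hmem.1
        have hic : i < c := hmem.2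
        have hilt : i.toNat < c.toNat := by omega
        rw [PySem.List.pyGetD_of_nonneg gono _ h0, PySem.List.pyGetD_of_nonneg t _ h0]
        rw [ht, List.getD_eq_getElem?_getD, List.getD_eq_getElem?_getD,
            List.getElem?_take_of_lt hilt]
      rw [hget]
    rw [hcongr, ← hlen,
        PySem.List.foldl_pyRange_zero_pyGetD' t 0
          (fun (s : Int × Int × Int) (x : Int) =>
            if x = 1 then (s.1 + 1, s.2.1, s.2.2)
            else if x = 2 then (s.1, s.2.1 + 1, s.2.2)
            else (s.1, s.2.1, s.2.2 + 1)) (0, 0, 0),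
        foldl_count_triple]
    simp
  · have : c < 0 := by omega
    rw [PySem.List.pyRange_one_eq_nil (by omega)]
    simp [hc, PySem.List.count]
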